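-- pv_equiv track=rewrite | github.com/helenakristela/Tucil1_13524109 | src/bruteforce.py | cek_kolom_baris
-- ===== SOURCE A (Python) =====
-- def cek_kolom_baris(queen, n):
--     if len(queen) != n : return False
--     baris = set()
--     kolom = set()
--     for (b,k) in queen:
--         if b in baris or k in kolom: return False
--         baris.add(b)
--         kolom.add(k)
--     return True
-- ===== SOURCE B (Python) =====
-- def _has_adjacent_equal(xs):
--     for i in range(len(xs) - 1):
--         if xs[i] == xs[i + 1]:
--             return True
--     return False
--
--
-- def cek_kolom_baris(queen, n):
--     if len(queen) != n:
--         return False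
--     rows = sorted(b for (b, k) in queen)
--     cols = sorted(k for (b, k) in queen)
--     return not _has_adjacent_equal(rows) and not _has_adjacent_equal(cols)
-- ===== Notes on version B (the rewrite author's own statement) =====
-- stated objective: alternative
-- what changed: Replaces A's single pass with two running hash sets and early return by a sort-then-scan: sort the row and the column coordinates and check that no two adjacent sorted values are equal.
import Mathlib
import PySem

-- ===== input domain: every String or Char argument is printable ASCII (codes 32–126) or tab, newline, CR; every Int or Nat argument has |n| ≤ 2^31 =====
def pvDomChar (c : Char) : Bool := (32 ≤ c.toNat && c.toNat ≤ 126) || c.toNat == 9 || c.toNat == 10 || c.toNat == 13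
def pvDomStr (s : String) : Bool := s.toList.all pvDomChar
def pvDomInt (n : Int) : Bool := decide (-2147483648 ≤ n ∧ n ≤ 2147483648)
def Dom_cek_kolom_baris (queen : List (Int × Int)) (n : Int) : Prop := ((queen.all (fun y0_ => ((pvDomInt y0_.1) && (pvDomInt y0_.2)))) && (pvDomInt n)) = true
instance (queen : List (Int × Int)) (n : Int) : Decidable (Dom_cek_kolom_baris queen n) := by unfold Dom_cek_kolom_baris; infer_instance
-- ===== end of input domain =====

-- B sorts the row and column coordinates and checks no two adjacent sorted values are equal (sort-then-scan), instead of A's one pass with running sets and early return.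


-- ===== PORT A =====
-- the 'for (b,k) in queen' loop with running sets 'baris'/'kolom' and early return False
def cekLoop : List (Int × Int) → PySem.Set Int → PySem.Set Int → Bool
  | [], _, _ => true
  | (b, k) :: rest, baris, kolom =>
    if baris.contains b || kolom.contains k then false
    else cekLoop rest (baris.add b) (kolom.add k)

def cek_kolom_baris (queen : List (Int × Int)) (n : Int) : Bool :=
  if (queen.length : Int) ≠ n then false
  else cekLoop queen PySem.Set.empty PySem.Set.empty

-- ===== PORT B =====
-- helper _has_adjacent_equal: scan the sorted list for an equal adjacent pair
def hasAdjacentEqual : List Int → Bool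
  | x :: y :: rest => if x == y then true else hasAdjacentEqual (y :: rest)
  | _ => false

def cek_kolom_baris_alt (queen : List (Int × Int)) (n : Int) : Bool :=
  if (queen.length : Int) ≠ n then false
  else
    let rows := PySem.List.sorted (queen.map Prod.fst) (fun x => x) false
    let cols := PySem.List.sorted (queen.map Prod.snd) (fun x => x) false
    !hasAdjacentEqual rows && !hasAdjacentEqual cols

-- ===== PRECONDITION & SPEC =====
def Spec_cek_kolom_baris (queen : List (Int × Int)) (n : Int) (out : Bool) : Prop := out = cek_kolom_baris_alt queen n
instance (queen : List (Int × Int)) (n : Int) (out : Bool) : Decidable (Spec_cek_kolom_baris queen n out) := by unfold Spec_cek_kolom_baris; infer_instance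

-- ===== CLAIM (what is proved, stated in full; the proofs are below) =====
def Claim_equal_cek_kolom_baris : Prop := ∀ (queen : List (Int × Int)) (n : Int), Dom_cek_kolom_baris queen n → Spec_cek_kolom_baris queen n (cek_kolom_baris queen n)

-- ===== LEMMAS AND PROOFS =====

-- A's loop returns true iff the rows and columns seen are fresh and pairwise distinct
lemma cekLoop_true_iff (l : List (Int × Int)) : ∀ (baris kolom : PySem.Set Int),
    cekLoop l baris kolom = true ↔
      ((l.map Prod.fst).Nodup ∧ (l.map Prod.snd).Nodup ∧
       (∀ x ∈ l.map Prod.fst, x ∉ baris) ∧ (∀ x ∈ l.map Prod.snd, x ∉ kolom)) := by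
  induction l with
  | nil => intro baris kolom; simp [cekLoop]
  | cons p rest ih =>
    intro baris kolom
    obtain ⟨b, k⟩ := p
    by_cases hb : b ∈ baris
    · have hc : baris.contains b = true := (PySem.Set.contains_iff baris b).2 hb
      simp only [cekLoop, hc, Bool.true_or]
      constructor
      · intro h; exact absurd h (by simp)
      · rintro ⟨_, _, h3, _⟩
        exact absurd hb (h3 b (by simp))
    · by_cases hk : k ∈ kolom
      · have hc : kolom.contains k = true := (PySem.Set.contains_iff kolom k).2 hk
        simp only [cekLoop, hc, Bool.or_true]
        constructor
        · intro h; exact absurd h (by simp)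
        · rintro ⟨_, _, _, h4⟩
          exact absurd hk (h4 k (by simp))
      · have hb' : baris.contains b = false := by
          cases h : baris.contains b
          · rfl
          · exact absurd ((PySem.Set.contains_iff baris b).1 h) hb
        have hk' : kolom.contains k = false := by
          cases h : kolom.contains k
          · rfl
          · exact absurd ((PySem.Set.contains_iff kolom k).1 h) hk
        simp only [cekLoop, hb', hk', Bool.or_self, if_neg Bool.false_ne_true,
          ih (baris.add b) (kolom.add k), List.map_cons, List.nodup_cons,
          List.forall_mem_cons, PySem.Set.mem_add, not_or]
        constructor
        · rintro ⟨h1, h2, h3, h4⟩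
          exact ⟨⟨fun hbm => ((h3 b hbm).2 rfl).elim, h1⟩,
                 ⟨fun hkm => ((h4 k hkm).2 rfl).elim, h2⟩,
                 ⟨hb, fun x hx => (h3 x hx).1⟩,
                 ⟨hk, fun x hx => (h4 x hx).1⟩⟩
        · rintro ⟨⟨hnb, h1⟩, ⟨hnk, h2⟩, ⟨_, h3⟩, ⟨_, h4⟩⟩
          exact ⟨h1, h2,
                 fun x hx => ⟨h3 x hx, fun hxb => hnb (hxb ▸ hx)⟩,
                 fun x hx => ⟨h4 x hx, fun hxk => hnk (hxk ▸ hx)⟩⟩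

-- hasAdjacentEqual is false iff adjacent elements are all distinct
lemma hasAdjacentEqual_eq_false_iff (l : List Int) :
    hasAdjacentEqual l = false ↔ l.IsChain (· ≠ ·) := by
  induction l with
  | nil => simp [hasAdjacentEqual]
  | cons x t ih =>
    cases t with
    | nil => simp [hasAdjacentEqual]
    | cons y r =>
      by_cases hxy : x = y
      · simp [hasAdjacentEqual, hxy]
      · simp only [hasAdjacentEqual, beq_iff_eq, if_neg hxy, ih,
          List.isChain_cons_cons]
        tauto

-- on a ≤-sorted list, no equal adjacent pair iff Nodup
lemma sorted_noAdj_iff_nodup (l : List Int) (hs : l.Pairwise (· ≤ ·)) :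
    l.IsChain (· ≠ ·) ↔ l.Nodup := by
  constructor
  · intro hc
    have hlt : l.IsChain (· < ·) := by
      have hle : l.IsChain (· ≤ ·) := hs.isChain
      rw [List.isChain_iff_forall_rel_of_append_cons_cons] at *
      intro a b l1 l2 hsplit
      exact lt_of_le_of_ne (hle hsplit) (hc hsplit)
    exact ((List.isChain_iff_pairwise).1 hlt).imp ne_of_lt
  · intro hn
    exact hn.isChain

-- ===== VERDICT (by name: the statement is the Claim_ definition above) =====
theorem cek_kolom_baris_spec : Claim_equal_cek_kolom_baris := by
  intro queen n _
  unfold Spec_cek_kolom_baris cek_kolom_baris cek_kolom_baris_alt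
  by_cases hn : (queen.length : Int) ≠ n
  · simp [hn]
  · rw [if_neg hn, if_neg hn]
    have key : ∀ xs : List Int,
        (!hasAdjacentEqual (PySem.List.sorted xs (fun x => x) false)) = true ↔ xs.Nodup := by
      intro xs
      rw [Bool.not_eq_eq_eq_not, Bool.not_true, hasAdjacentEqual_eq_false_iff,
        sorted_noAdj_iff_nodup _ (PySem.List.sorted_pairwise xs (fun x => x)),
        (PySem.List.sorted_perm xs (fun x => x) false).nodup_iff]
    rcases h : cekLoop queen PySem.Set.empty PySem.Set.empty with _ | _
    · have hnot := (cekLoop_true_iff queen PySem.Set.empty PySem.Set.empty).not.1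
        (by simp only [h]; exact Bool.false_ne_true)
      symm
      by_contra hc
      rw [Bool.not_eq_false, Bool.and_eq_true, key, key] at hc
      exact hnot ⟨hc.1, hc.2, by simp [PySem.Set.empty], by simp [PySem.Set.empty]⟩
    · obtain ⟨h1, h2, _, _⟩ := (cekLoop_true_iff queen PySem.Set.empty PySem.Set.empty).1 h
      symm
      rw [Bool.and_eq_true, key, key]
      exact ⟨h1, h2⟩
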